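-- pv_equiv track=rewrite | github.com/jailsonnetodev/PISI3 | pages/2_Tempo de Permanencia.py | category_label
-- ===== SOURCE A (Python) =====
-- def category_label(list_classes, old_values):
--   list_classes.sort()
--   new_list = [None] * len(old_values)
--   for i, old in enumerate(old_values):
--     for index, value in enumerate(list_classes):
--       if(len(list_classes)-1 == index):
--         new_list[i] = f'mais de {value} dias'
--       else:
--         if(value <= old < list_classes[index+1]):
--           new_list[i] = f'{value} a {list_classes[index+1]} dias'
--           break
--   return new_list
-- ===== SOURCE B (Python) =====
-- from bisect import bisect_right
--
-- def category_label(list_classes, old_values):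
--     # Note: like A, this sorts list_classes in place (observable mutation).
--     list_classes.sort()
--     cs = list_classes
--     n = len(cs)
--     out = []
--     for old in old_values:
--         if n == 0:
--             out.append(None)
--             continue
--         j = bisect_right(cs, old) - 1
--         if 0 <= j < n - 1:
--             out.append(f'{cs[j]} a {cs[j+1]} dias')
--         else:
--             out.append(f'mais de {cs[-1]} dias')
--     return out
-- ===== Notes on version B (the rewrite author's own statement) =====
-- stated objective: faster
-- what changed: Replaces A's per-value linear scan over the class list (with an indexed lookahead and a break) by one bisect_right binary search per value into the sorted class boundaries, picking the interval or the 'mais de' fallback directly from the insertion point.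
import Mathlib
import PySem

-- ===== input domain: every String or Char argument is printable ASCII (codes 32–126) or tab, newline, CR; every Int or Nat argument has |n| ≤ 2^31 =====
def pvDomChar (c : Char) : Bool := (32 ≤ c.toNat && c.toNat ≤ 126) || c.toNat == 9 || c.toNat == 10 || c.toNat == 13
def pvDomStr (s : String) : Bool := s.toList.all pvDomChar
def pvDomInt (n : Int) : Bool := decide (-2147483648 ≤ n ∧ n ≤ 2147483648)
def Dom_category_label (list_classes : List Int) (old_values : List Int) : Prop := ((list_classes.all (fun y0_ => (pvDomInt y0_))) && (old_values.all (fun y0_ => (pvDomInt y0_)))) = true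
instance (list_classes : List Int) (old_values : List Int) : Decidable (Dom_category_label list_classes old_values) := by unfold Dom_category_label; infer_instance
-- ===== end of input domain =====

-- B replaces A's per-value linear scan over the class list by one bisect_right binary search
-- per value into the sorted class boundaries (objective: faster).
-- Both A and B sort list_classes in place in Python (identical side effect); the theorem is
-- about the return value.

-- ===== PORT A =====
-- inner 'for index, value in enumerate(list_classes)' loop; cur is the current new_list[i]
-- cell; returning 'some r' directly at the interval branch is the 'break'.
def categoryInnerA (cs : List Int) (old : Int) : List (Int × Int) → Option String → Option String
  | [], cur => cur
  | (index, value) :: rest, cur =>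
    if (cs.length : Int) - 1 = index then
      categoryInnerA cs old rest (some ("mais de " ++ PySem.Int.toStr value ++ " dias"))
    else
      -- list_classes[index+1]: always in range in this branch (index < len-1), so getD 0 is exact
      if value ≤ old ∧ old < (PySem.List.pyGet? cs (index + 1)).getD 0 then
        some (PySem.Int.toStr value ++ " a " ++ PySem.Int.toStr ((PySem.List.pyGet? cs (index + 1)).getD 0) ++ " dias")
      else
        categoryInnerA cs old rest cur

def category_label (list_classes : List Int) (old_values : List Int) : List (Option String) :=
  let cs := PySem.List.sorted list_classes (fun x => x)
  old_values.map (fun old => categoryInnerA cs old (PySem.List.enumerate cs) none)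

-- ===== PORT B =====
-- per-value label by binary search (bisect_right) into the sorted class list
def labelOfB (cs : List Int) (old : Int) : Option String :=
  if cs.length = 0 then none
  else
    let j : Int := (PySem.List.bisectRight cs old : Int) - 1
    if 0 ≤ j ∧ j < (cs.length : Int) - 1 then
      some (PySem.Int.toStr ((PySem.List.pyGet? cs j).getD 0) ++ " a " ++ PySem.Int.toStr ((PySem.List.pyGet? cs (j + 1)).getD 0) ++ " dias")
    else
      some ("mais de " ++ PySem.Int.toStr ((PySem.List.pyGet? cs (-1)).getD 0) ++ " dias")

def category_label_alt (list_classes : List Int) (old_values : List Int) : List (Option String) :=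
  let cs := PySem.List.sorted list_classes (fun x => x)
  old_values.map (fun old => labelOfB cs old)

-- ===== PRECONDITION & SPEC =====
def Spec_category_label (list_classes : List Int) (old_values : List Int) (out : List (Option String)) : Prop := out = category_label_alt list_classes old_values
instance (list_classes : List Int) (old_values : List Int) (out : List (Option String)) : Decidable (Spec_category_label list_classes old_values out) := by unfold Spec_category_label; infer_instance

-- ===== CLAIM (what is proved, stated in full; the proofs are below) =====
def Claim_equal_category_label : Prop := ∀ (list_classes : List Int) (old_values : List Int), Dom_category_label list_classes old_values → Spec_category_label list_classes old_values (category_label list_classes old_values)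

-- ===== LEMMAS AND PROOFS =====

-- A's inner loop, re-expressed structurally on the remaining suffix of cs
def gA (old : Int) : List Int → Option String → Option String
  | [], cur => cur
  | [v], _cur => some ("mais de " ++ PySem.Int.toStr v ++ " dias")
  | v :: w :: rest, cur =>
    if v ≤ old ∧ old < w then
      some (PySem.Int.toStr v ++ " a " ++ PySem.Int.toStr w ++ " dias")
    else
      gA old (w :: rest) cur

-- bridge: the enumerate loop over the suffix of cs starting at k computes gA on that suffix
theorem bridgeA (cs : List Int) (old : Int) :
    ∀ (s : List Int) (k : Nat) (cur : Option String), cs.drop k = s →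
      categoryInnerA cs old (PySem.List.enumerate s (k : Int)) cur = gA old s cur := by
  intro s
  induction s with
  | nil => intro k cur _; simp [PySem.List.enumerate, categoryInnerA, gA]
  | cons v s' ih =>
    intro k cur hdrop
    have hk : k < cs.length := by
      by_contra h
      simp [List.drop_eq_nil_of_le (Nat.le_of_not_lt h)] at hdrop
    have hlen : cs.length = k + s'.length + 1 := by
      have := congrArg List.length hdrop
      simp at this; omega
    rw [PySem.List.enumerate_cons]
    cases s' with
    | nil =>
      have hcond : (cs.length : Int) - 1 = (k : Int) := by
        have h1 : cs.length = k + 0 + 1 := by simpa using hlen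
        omega
      simp [categoryInnerA, hcond, PySem.List.enumerate, gA]
    | cons w rest =>
      have hcond : ¬ ((cs.length : Int) - 1 = (k : Int)) := by
        have h1 : cs.length = k + (rest.length + 1) + 1 := by simpa using hlen
        omega
      have hget : PySem.List.pyGet? cs ((k : Int) + 1) = some w := by
        have h1 : (cs.drop k)[1]? = some w := by rw [hdrop]; rfl
        rw [List.getElem?_drop] at h1
        have hcast : ((k : Int) + 1) = ((k + 1 : Nat) : Int) := by push_cast; ring
        rw [hcast, PySem.List.pyGet?_natCast, h1]
      simp only [categoryInnerA, hcond, if_false, hget, Option.getD_some]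
      by_cases hvw : v ≤ old ∧ old < w
      · simp [gA, hvw]
      · simp only [gA, if_neg hvw]
        have hc : (k : Int) + 1 = ((k + 1 : Nat) : Int) := by push_cast; ring
        rw [hc, ih (k + 1) cur (by rw [← List.drop_drop, hdrop]; rfl)]

-- positional characterisation of countP (· ≤ x) on a sorted list
theorem countP_pos_spec (x : Int) :
    ∀ (cs : List Int), cs.Pairwise (· ≤ ·) →
      (∀ (j : Nat) (hj : j < cs.length), j < cs.countP (fun c => decide (c ≤ x)) → cs[j] ≤ x) ∧
      (∀ (j : Nat) (hj : j < cs.length), cs.countP (fun c => decide (c ≤ x)) ≤ j → x < cs[j]) := by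
  intro cs
  induction cs with
  | nil => intro _; constructor <;> intro j hj <;> simp at hj
  | cons v t ih =>
    intro hp
    rw [List.pairwise_cons] at hp
    obtain ⟨hv, hpt⟩ := hp
    obtain ⟨iht1, iht2⟩ := ih hpt
    by_cases hvx : v ≤ x
    · have hc : (v :: t).countP (fun c => decide (c ≤ x)) = t.countP (fun c => decide (c ≤ x)) + 1 := by
        simp [hvx]
      constructor
      · intro j hj hlt
        cases j with
        | zero => simpa using hvx
        | succ m =>
          have hm : m < t.length := by simpa using hj
          simpa using iht1 m hm (by omega)
      · intro j hj hge
        cases j with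
        | zero => omega
        | succ m =>
          have hm : m < t.length := by simpa using hj
          simpa using iht2 m hm (by omega)
    · have hc : (v :: t).countP (fun c => decide (c ≤ x)) = 0 := by
        rw [List.countP_eq_zero]
        intro a ha
        simp only [List.mem_cons] at ha
        rcases ha with rfl | ha
        · simpa using hvx
        · have := hv a ha
          simp only [decide_eq_true_eq]; omega
      constructor
      · intro j hj hlt; omega
      · intro j hj _
        cases j with
        | zero => simpa using (by omega : x < v)
        | succ m =>
          have hm : m < t.length := by simpa using hj
          have := hv t[m] (List.getElem_mem hm)
          simpa using (by omega : x < t[m])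

-- PySem.List.bisectRight equals countP (· ≤ x) on a sorted list (uniqueness of the split point)
theorem bisect_eq_countP (cs : List Int) (x : Int) (h : cs.Pairwise (· ≤ ·)) :
    PySem.List.bisectRight cs x = cs.countP (fun c => decide (c ≤ x)) := by
  obtain ⟨hble, hb1, hb2⟩ := PySem.List.bisectRight_spec cs x h
  obtain ⟨hc1, hc2⟩ := countP_pos_spec x cs h
  have hcle : cs.countP (fun c => decide (c ≤ x)) ≤ cs.length := List.countP_le_length
  by_contra hne
  rcases Nat.lt_or_ge (PySem.List.bisectRight cs x) (cs.countP (fun c => decide (c ≤ x))) with hlt | hge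
  · have hj : PySem.List.bisectRight cs x < cs.length := by omega
    have h1 := hc1 _ hj hlt
    have h2 := hb2 _ hj (Nat.le_refl _)
    omega
  · have hlt : cs.countP (fun c => decide (c ≤ x)) < PySem.List.bisectRight cs x := by omega
    have hj : cs.countP (fun c => decide (c ≤ x)) < cs.length := by omega
    have h1 := hb1 _ hj hlt
    have h2 := hc2 _ hj (Nat.le_refl _)
    omega

theorem countP_zero_of_lt (x : Int) (t : List Int) (w : Int) (hw : x < w)
    (hpt : (w :: t).Pairwise (· ≤ ·)) :
    (w :: t).countP (fun c => decide (c ≤ x)) = 0 := by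
  rw [List.countP_eq_zero]
  intro a ha
  rw [List.pairwise_cons] at hpt
  simp only [List.mem_cons] at ha
  rcases ha with rfl | ha
  · simp only [decide_eq_true_eq]; omega
  · have := hpt.1 a ha
    simp only [decide_eq_true_eq]; omega

-- when old is not in the head interval, dropping the head class does not change B's label
theorem labelOfB_cons_skip (old v w : Int) (rest : List Int)
    (hp : (v :: w :: rest).Pairwise (· ≤ ·))
    (hnot : ¬ (v ≤ old ∧ old < w)) :
    labelOfB (v :: w :: rest) old = labelOfB (w :: rest) old := by
  have hvw : v ≤ w := (List.pairwise_cons.mp hp).1 w (by simp)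
  have hpt : (w :: rest).Pairwise (· ≤ ·) := (List.pairwise_cons.mp hp).2
  by_cases hv : v ≤ old
  · -- then w ≤ old : the head contributes one to the count, indices shift by one
    have hw : w ≤ old := by
      by_contra hno
      exact hnot ⟨hv, by omega⟩
    have hcnt1 : PySem.List.bisectRight (v :: w :: rest) old =
        PySem.List.bisectRight (w :: rest) old + 1 := by
      rw [bisect_eq_countP _ _ hp, bisect_eq_countP _ _ hpt]
      simp [hv]
    obtain ⟨m, hm⟩ : ∃ m, PySem.List.bisectRight (w :: rest) old = m + 1 := by
      rw [bisect_eq_countP _ _ hpt]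
      have : (w :: rest).countP (fun c => decide (c ≤ old)) =
          rest.countP (fun c => decide (c ≤ old)) + 1 := by simp [hw]
      exact ⟨_, this⟩
    simp only [labelOfB, hcnt1, hm, List.length_cons]
    have e1 : ((m + 1 + 1 : Nat) : Int) - 1 = ((m : Int) + 1) := by push_cast; ring
    have e2 : ((m + 1 : Nat) : Int) - 1 = (m : Int) := by push_cast; ring
    rw [e1, e2]
    have hc : (0 ≤ (m : Int) + 1 ∧ (m : Int) + 1 < ((rest.length + 1 + 1 : Nat) : Int) - 1) ↔
        (0 ≤ (m : Int) ∧ (m : Int) < ((rest.length + 1 : Nat) : Int) - 1) := by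
      constructor <;> intro hh <;> constructor <;> push_cast at hh ⊢ <;> omega
    rw [if_neg (show ¬ ((rest.length + 1 + 1 : Nat) = 0) by omega),
        if_neg (show ¬ ((rest.length + 1 : Nat) = 0) by omega)]
    by_cases hcase : 0 ≤ (m : Int) ∧ (m : Int) < ((rest.length + 1 : Nat) : Int) - 1
    · rw [if_pos (hc.mpr hcase), if_pos hcase]
      have g1 : PySem.List.pyGet? (v :: w :: rest) ((m : Int) + 1) = PySem.List.pyGet? (w :: rest) (m : Int) :=
        PySem.List.pyGet?_cons_succ v (w :: rest) m
      have g2 : PySem.List.pyGet? (v :: w :: rest) (((m : Int) + 1) + 1) = PySem.List.pyGet? (w :: rest) ((m : Int) + 1) := by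
        have hcast : ((m : Int) + 1) + 1 = ((m + 1 : Nat) : Int) + 1 := by push_cast; ring
        rw [hcast, PySem.List.pyGet?_cons_succ v (w :: rest) (m + 1)]
        push_cast; ring_nf
      rw [g1, g2]
    · rw [if_neg (fun hh => hcase (hc.mp hh)), if_neg hcase]
      rw [PySem.List.pyGet?_neg_one, PySem.List.pyGet?_neg_one, List.getLast?_cons_cons]
  · -- old < v ≤ w : count is 0 on both lists, both give the 'mais de last' label
    have hov : old < v := by omega
    have hc1 : PySem.List.bisectRight (v :: w :: rest) old = 0 := by
      rw [bisect_eq_countP _ _ hp]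
      exact countP_zero_of_lt old (w :: rest) v hov hp
    have hc2 : PySem.List.bisectRight (w :: rest) old = 0 := by
      rw [bisect_eq_countP _ _ hpt]
      exact countP_zero_of_lt old rest w (by omega) hpt
    simp only [labelOfB, hc1, hc2, List.length_cons]
    simp [PySem.List.pyGet?_neg_one, List.getLast?_cons_cons]

-- the main per-value equivalence on a sorted class list
theorem gA_eq_labelOfB (old : Int) :
    ∀ (cs : List Int), cs.Pairwise (· ≤ ·) → gA old cs none = labelOfB cs old := by
  intro cs
  induction cs with
  | nil => intro _; simp [gA, labelOfB]
  | cons v t ih =>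
    intro hp
    cases t with
    | nil =>
      -- single class: A writes 'mais de v'; B's count is 0 or 1, j ∈ {-1, 0}, never < len-1 = 0
      have hb : PySem.List.bisectRight [v] old ≤ 1 := by
        have := (PySem.List.bisectRight_spec [v] old (by simp)).1
        simpa using this
      simp only [gA, labelOfB, List.length_cons, List.length_nil]
      rw [if_neg (by simp), if_neg (by push_cast; omega)]
      rw [PySem.List.pyGet?_neg_one]
      rfl
    | cons w rest =>
      have hpt : (w :: rest).Pairwise (· ≤ ·) := (List.pairwise_cons.mp hp).2
      by_cases hin : v ≤ old ∧ old < w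
      · -- old lies in the first interval [v, w)
        have hcw : (w :: rest).countP (fun c => decide (c ≤ old)) = 0 :=
          countP_zero_of_lt old rest w hin.2 hpt
        have hb : PySem.List.bisectRight (v :: w :: rest) old = 1 := by
          rw [bisect_eq_countP _ _ hp]
          simp [hin.1, hcw]
        simp only [gA, if_pos hin, labelOfB, hb, List.length_cons]
        rw [if_neg (by simp)]
        have e1 : ((1 : Nat) : Int) - 1 = 0 := by norm_num
        rw [e1, if_pos (by refine ⟨by norm_num, by push_cast; omega⟩)]
        rw [PySem.List.pyGet?_zero_cons]
        have h01 : (0 : Int) + 1 = ((0 : Nat) : Int) + 1 := by norm_num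
        rw [h01, PySem.List.pyGet?_cons_succ v (w :: rest) 0]
        simp
      · rw [labelOfB_cons_skip old v w rest hp hin |>.symm] at *
        simp only [gA, if_neg hin]
        rw [ih hpt, labelOfB_cons_skip old v w rest hp hin]

-- sortedness of the shared sorted class list
theorem sorted_pairwise_id (xs : List Int) :
    (PySem.List.sorted xs (fun x => x)).Pairwise (· ≤ ·) := by
  have := PySem.List.sorted_pairwise xs (fun x : Int => x)
  simpa using this

-- ===== VERDICT (by name: the statement is the Claim_ definition above) =====
theorem category_label_spec : Claim_equal_category_label := by
  intro list_classes old_values _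
  unfold Spec_category_label category_label category_label_alt
  apply List.map_congr_left
  intro old _
  have hb0 := bridgeA (PySem.List.sorted list_classes (fun x => x)) old
    (PySem.List.sorted list_classes (fun x => x)) 0 none (by simp)
  norm_num at hb0
  rw [hb0]
  exact gA_eq_labelOfB old _ (sorted_pairwise_id list_classes)
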